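-- pv_equiv track=rewrite | github.com/Youhai020616/Intelligent_Trading_Bot | src/agents/analysts.py | _extract_news_recommendations
-- ===== SOURCE A (Python) =====
-- from typing import Dict, Any, List
--
-- def _extract_news_recommendations(analysis: str) -> List[str]:
--     """Extract news-based recommendations."""
--     recommendations = []
--
--     analysis_lower = analysis.lower()
--
--     if any(word in analysis_lower for word in ["positive", "bullish", "strong"]):
--         recommendations.append("News supports positive outlook")
--     if any(word in analysis_lower for word in ["negative", "bearish", "weak"]):
--         recommendations.append("News suggests caution")
--     if "earnings" in analysis_lower:
--         recommendations.append("Monitor upcoming earnings announcements")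
--     if any(word in analysis_lower for word in ["fed", "interest", "policy"]):
--         recommendations.append("Consider macroeconomic policy impacts")
--
--     return recommendations[:3]
-- ===== SOURCE B (Python) =====
-- _KEYWORD_TO_MSG = {
--     "positive": "News supports positive outlook",
--     "bullish": "News supports positive outlook",
--     "strong": "News supports positive outlook",
--     "negative": "News suggests caution",
--     "bearish": "News suggests caution",
--     "weak": "News suggests caution",
--     "earnings": "Monitor upcoming earnings announcements",
--     "fed": "Consider macroeconomic policy impacts",
--     "interest": "Consider macroeconomic policy impacts",
--     "policy": "Consider macroeconomic policy impacts",
-- }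
--
-- _MSG_ORDER = [
--     "News supports positive outlook",
--     "News suggests caution",
--     "Monitor upcoming earnings announcements",
--     "Consider macroeconomic policy impacts",
-- ]
--
-- def _extract_news_recommendations(analysis: str):
--     """Extract news-based recommendations by scanning the text once, position by position."""
--     text = analysis.lower()
--     found = set()
--     for i in range(len(text)):
--         for keyword, msg in _KEYWORD_TO_MSG.items():
--             if text.startswith(keyword, i):
--                 found.add(msg)
--     return [m for m in _MSG_ORDER if m in found][:3]
-- ===== Notes on version B (the rewrite author's own statement) =====
-- stated objective: alternative
-- what changed: Instead of testing each keyword group with substring containment over the whole text, B scans the lowered text once position by position, collecting into a set the message of every keyword that starts there (via str.startswith with an offset), then emits the found messages in the fixed category order sliced to three.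
import Mathlib
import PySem

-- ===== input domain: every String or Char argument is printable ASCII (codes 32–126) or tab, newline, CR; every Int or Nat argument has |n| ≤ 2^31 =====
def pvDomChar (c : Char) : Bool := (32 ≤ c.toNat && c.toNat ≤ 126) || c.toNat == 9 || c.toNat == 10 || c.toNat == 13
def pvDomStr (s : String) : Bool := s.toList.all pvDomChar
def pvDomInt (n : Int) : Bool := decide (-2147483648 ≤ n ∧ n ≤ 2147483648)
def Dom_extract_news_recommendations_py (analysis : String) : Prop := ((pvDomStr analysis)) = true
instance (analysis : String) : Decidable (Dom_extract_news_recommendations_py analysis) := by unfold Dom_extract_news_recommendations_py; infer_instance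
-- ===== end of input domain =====

-- B replaces the four per-keyword-group substring tests with a single position-by-position scan of the
-- lowered text that collects matched categories into a set (alternative algorithm, same return value).


-- ===== PORT A =====
def extract_news_recommendations_py (analysis : String) : List String :=
  let analysis_lower := PySem.Str.lower analysis
  let recommendations : List String := []
  let recommendations := if ["positive", "bullish", "strong"].any (fun word => PySem.Str.isIn word analysis_lower)
    then recommendations ++ ["News supports positive outlook"] else recommendations
  let recommendations := if ["negative", "bearish", "weak"].any (fun word => PySem.Str.isIn word analysis_lower)
    then recommendations ++ ["News suggests caution"] else recommendations
  let recommendations := if PySem.Str.isIn "earnings" analysis_lower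
    then recommendations ++ ["Monitor upcoming earnings announcements"] else recommendations
  let recommendations := if ["fed", "interest", "policy"].any (fun word => PySem.Str.isIn word analysis_lower)
    then recommendations ++ ["Consider macroeconomic policy impacts"] else recommendations
  PySem.List.slice recommendations none (some 3)

-- ===== PORT B =====
-- _KEYWORD_TO_MSG: the dict as an association list in insertion order (iterated via .items()).
def newsKeywordToMsg : List (String × String) :=
  [ ("positive", "News supports positive outlook")
  , ("bullish", "News supports positive outlook")
  , ("strong", "News supports positive outlook")
  , ("negative", "News suggests caution")
  , ("bearish", "News suggests caution")
  , ("weak", "News suggests caution")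
  , ("earnings", "Monitor upcoming earnings announcements")
  , ("fed", "Consider macroeconomic policy impacts")
  , ("interest", "Consider macroeconomic policy impacts")
  , ("policy", "Consider macroeconomic policy impacts") ]

def newsMsgOrder : List String :=
  [ "News supports positive outlook"
  , "News suggests caution"
  , "Monitor upcoming earnings announcements"
  , "Consider macroeconomic policy impacts" ]

-- text.startswith(keyword, i) with 0 ≤ i ≤ len(text) is exactly
-- PySem.Chars.startswith (text.drop i) keyword.toList (hand port of the offset form, exact on that range).
def extract_news_recommendations_py_alt (analysis : String) : List String :=
  let text := (PySem.Str.lower analysis).toList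
  let found : PySem.Set String :=
    (List.range text.length).foldl
      (fun acc i =>
        newsKeywordToMsg.foldl
          (fun acc2 kv =>
            if PySem.Chars.startswith (text.drop i) kv.1.toList then PySem.Set.add acc2 kv.2 else acc2)
          acc)
      PySem.Set.empty
  PySem.List.slice (newsMsgOrder.filter (fun m => PySem.Set.contains found m)) none (some 3)

-- ===== PRECONDITION & SPEC =====
def Spec_extract_news_recommendations_py (analysis : String) (out : List String) : Prop := out = extract_news_recommendations_py_alt analysis
instance (analysis : String) (out : List String) : Decidable (Spec_extract_news_recommendations_py analysis out) := by unfold Spec_extract_news_recommendations_py; infer_instance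

-- ===== CLAIM (what is proved, stated in full; the proofs are below) =====
def Claim_equal_extract_news_recommendations_py : Prop := ∀ (analysis : String), Dom_extract_news_recommendations_py analysis → Spec_extract_news_recommendations_py analysis (extract_news_recommendations_py analysis)

-- ===== LEMMAS AND PROOFS =====

-- membership after the inner fold over the keyword table
lemma mem_inner_fold (x : String) (rules : List (String × String)) (p : String × String → Bool)
    (acc : PySem.Set String) :
    x ∈ rules.foldl (fun a kv => if p kv then PySem.Set.add a kv.2 else a) acc ↔
      x ∈ acc ∨ ∃ kv ∈ rules, p kv = true ∧ kv.2 = x := by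
  induction rules generalizing acc with
  | nil => simp
  | cons kv rest ih =>
    simp only [List.foldl_cons, ih, List.mem_cons]
    by_cases hp : p kv = true
    · simp only [hp, if_true, PySem.Set.mem_add]
      constructor
      · rintro ((h | h) | ⟨kv', h, hk⟩)
        · exact Or.inl h
        · exact Or.inr ⟨kv, Or.inl rfl, hp, h.symm⟩
        · exact Or.inr ⟨kv', Or.inr h, hk⟩
      · rintro (h | ⟨kv', (rfl | h), hk⟩)
        · exact Or.inl (Or.inl h)
        · exact Or.inl (Or.inr hk.2.symm)
        · exact Or.inr ⟨kv', h, hk⟩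
    · simp only [hp]
      constructor
      · rintro (h | ⟨kv', h, hk⟩)
        · exact Or.inl h
        · exact Or.inr ⟨kv', Or.inr h, hk⟩
      · rintro (h | ⟨kv', (rfl | h), hk⟩)
        · exact Or.inl h
        · exact absurd hk.1 hp
        · exact Or.inr ⟨kv', h, hk⟩

-- membership after the full scan over the positions
lemma mem_scan (text : List Char) (n : Nat) (acc : PySem.Set String) (x : String) :
    x ∈ (List.range n).foldl
        (fun acc i =>
          newsKeywordToMsg.foldl
            (fun acc2 kv =>
              if PySem.Chars.startswith (text.drop i) kv.1.toList then PySem.Set.add acc2 kv.2 else acc2)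
            acc)
        acc ↔
      x ∈ acc ∨ ∃ i < n, ∃ kv ∈ newsKeywordToMsg,
        PySem.Chars.startswith (text.drop i) kv.1.toList = true ∧ kv.2 = x := by
  induction n generalizing acc with
  | zero => simp
  | succ m ih =>
    rw [List.range_succ, List.foldl_append]
    simp only [List.foldl_cons, List.foldl_nil]
    rw [mem_inner_fold, ih]
    constructor
    · rintro ((h | ⟨i, hi, kv, hm, hs, hk⟩) | ⟨kv, hm, hs, hk⟩)
      · exact Or.inl h
      · exact Or.inr ⟨i, Nat.lt_succ_of_lt hi, kv, hm, hs, hk⟩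
      · exact Or.inr ⟨m, Nat.lt_succ_self m, kv, hm, hs, hk⟩
    · rintro (h | ⟨i, hi, kv, hm, hs, hk⟩)
      · exact Or.inl (Or.inl h)
      · rcases Nat.lt_succ_iff_lt_or_eq.mp hi with hi' | rfl
        · exact Or.inl (Or.inr ⟨i, hi', kv, hm, hs, hk⟩)
        · exact Or.inr ⟨kv, hm, hs, hk⟩

-- a nonempty keyword occurs in the text iff it starts at some position < length
lemma exists_startswith_iff_isIn (text sub : List Char) (hs : sub ≠ []) :
    (∃ i < text.length, PySem.Chars.startswith (text.drop i) sub = true) ↔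
      PySem.Chars.isIn sub text = true := by
  rw [← PySem.Chars.exists_prefix_drop_iff_isIn]
  constructor
  · rintro ⟨i, _, h⟩; exact ⟨i, (PySem.Chars.startswith_iff _ _).1 h⟩
  · rintro ⟨j, h⟩
    have hj : j < text.length := by
      rcases Nat.lt_or_ge j text.length with h' | h'
      · exact h'
      · rw [List.drop_eq_nil_of_le h'] at h
        exact absurd (List.prefix_nil.mp h) hs
    exact ⟨j, hj, (PySem.Chars.startswith_iff _ _).2 h⟩

-- the scan finds msg iff one of its keywords (per the table) occurs in the text
lemma exists_kv_iff (text : List Char) (subs : List String) (msg : String)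
    (h1 : ∀ kv ∈ newsKeywordToMsg, kv.2 = msg → kv.1 ∈ subs)
    (h2 : ∀ w ∈ subs, (w, msg) ∈ newsKeywordToMsg)
    (hne : ∀ w ∈ subs, w.toList ≠ []) :
    (∃ i < text.length, ∃ kv ∈ newsKeywordToMsg,
        PySem.Chars.startswith (text.drop i) kv.1.toList = true ∧ kv.2 = msg) ↔
      subs.any (fun w => PySem.Chars.isIn w.toList text) = true := by
  rw [List.any_eq_true]
  constructor
  · rintro ⟨i, hi, kv, hm, hs, hk⟩
    refine ⟨kv.1, h1 kv hm hk, ?_⟩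
    exact (exists_startswith_iff_isIn text kv.1.toList (hne _ (h1 kv hm hk))).1 ⟨i, hi, hs⟩
  · rintro ⟨w, hw, hin⟩
    rcases (exists_startswith_iff_isIn text w.toList (hne _ hw)).2 hin with ⟨i, hi, hs⟩
    exact ⟨i, hi, (w, msg), h2 w hw, hs, rfl⟩

-- contains on the scanned set, characterised for one message via its keyword list
lemma contains_scan (text : List Char) (subs : List String) (msg : String)
    (h1 : ∀ kv ∈ newsKeywordToMsg, kv.2 = msg → kv.1 ∈ subs)
    (h2 : ∀ w ∈ subs, (w, msg) ∈ newsKeywordToMsg)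
    (hne : ∀ w ∈ subs, w.toList ≠ []) :
    PySem.Set.contains
        ((List.range text.length).foldl
          (fun acc i =>
            newsKeywordToMsg.foldl
              (fun acc2 kv =>
                if PySem.Chars.startswith (text.drop i) kv.1.toList then PySem.Set.add acc2 kv.2 else acc2)
              acc)
          PySem.Set.empty)
        msg
      = subs.any (fun w => PySem.Chars.isIn w.toList text) := by
  rw [Bool.eq_iff_iff, PySem.Set.contains_iff, mem_scan]
  simp only [PySem.Set.empty, List.not_mem_nil, false_or]
  exact exists_kv_iff text subs msg h1 h2 hne

-- ===== VERDICT (by name: the statement is the Claim_ definition above) =====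
set_option maxHeartbeats 2000000 in
theorem extract_news_recommendations_py_spec : Claim_equal_extract_news_recommendations_py := by
  intro analysis _
  unfold Spec_extract_news_recommendations_py extract_news_recommendations_py
    extract_news_recommendations_py_alt
  have hc1 := contains_scan ((PySem.Str.lower analysis).toList)
    ["positive", "bullish", "strong"] "News supports positive outlook"
    (by decide) (by decide) (by decide)
  have hc2 := contains_scan ((PySem.Str.lower analysis).toList)
    ["negative", "bearish", "weak"] "News suggests caution"
    (by decide) (by decide) (by decide)
  have hc3 := contains_scan ((PySem.Str.lower analysis).toList)
    ["earnings"] "Monitor upcoming earnings announcements"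
    (by decide) (by decide) (by decide)
  have hc4 := contains_scan ((PySem.Str.lower analysis).toList)
    ["fed", "interest", "policy"] "Consider macroeconomic policy impacts"
    (by decide) (by decide) (by decide)
  simp only [PySem.Str.isIn_eq, newsMsgOrder, List.filter_cons, List.filter_nil,
    List.any_cons, List.any_nil, Bool.or_false] at hc1 hc2 hc3 hc4 ⊢
  rw [hc1, hc2, hc3, hc4]
  cases h1 : (PySem.Chars.isIn "positive".toList (PySem.Str.lower analysis).toList ||
      (PySem.Chars.isIn "bullish".toList (PySem.Str.lower analysis).toList ||
        PySem.Chars.isIn "strong".toList (PySem.Str.lower analysis).toList)) <;>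
  cases h2 : (PySem.Chars.isIn "negative".toList (PySem.Str.lower analysis).toList ||
      (PySem.Chars.isIn "bearish".toList (PySem.Str.lower analysis).toList ||
        PySem.Chars.isIn "weak".toList (PySem.Str.lower analysis).toList)) <;>
  cases h3 : PySem.Chars.isIn "earnings".toList (PySem.Str.lower analysis).toList <;>
  cases h4 : (PySem.Chars.isIn "fed".toList (PySem.Str.lower analysis).toList ||
      (PySem.Chars.isIn "interest".toList (PySem.Str.lower analysis).toList ||
        PySem.Chars.isIn "policy".toList (PySem.Str.lower analysis).toList)) <;>
  rfl
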